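-- pv_equiv track=rewrite | github.com/AshtonVaughan/bountyhound | proxy-engine/intruder.py | generate_charset_bruteforce
-- ===== SOURCE A (Python) =====
-- import itertools
--
-- def generate_charset_bruteforce(charset: str, min_len: int = 1,
--                                 max_len: int = 3) -> list[str]:
--     """Generate all combinations of characters from a charset."""
--     results = []
--     for length in range(min_len, max_len + 1):
--         for combo in itertools.product(charset, repeat=length):
--             results.append("".join(combo))
--             if len(results) >= 100_000:
--                 return results
--     return results
-- ===== SOURCE B (Python) =====
-- def generate_charset_bruteforce(charset: str, min_len: int = 1,
--                                 max_len: int = 3) -> list[str]: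
--     """Generate all combinations of characters from a charset."""
--     results = []
--     if min_len > max_len:
--         return results
--     current = [""]  # all strings of the current length (capped at 100k)
--     for length in range(0, max_len + 1):
--         if length >= min_len:
--             need = 100_000 - len(results)
--             if len(current) >= need:
--                 return results + current[:need]
--             results.extend(current)
--         if length < max_len:
--             nxt = []
--             for s in current:
--                 if len(nxt) >= 100_000:
--                     break
--                 nxt.extend(s + c for c in charset)
--             current = nxt[:100_000]
--     return results
-- ===== Notes on version B (the rewrite author's own statement) =====
-- stated objective: alternative
-- what changed: B builds each length's strings by extending the previous length's list (capped at the 100k result limit) instead of calling itertools.product from scratch per length, and emits via counted slices instead of per-item appends with an early-return check.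
import Mathlib
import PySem

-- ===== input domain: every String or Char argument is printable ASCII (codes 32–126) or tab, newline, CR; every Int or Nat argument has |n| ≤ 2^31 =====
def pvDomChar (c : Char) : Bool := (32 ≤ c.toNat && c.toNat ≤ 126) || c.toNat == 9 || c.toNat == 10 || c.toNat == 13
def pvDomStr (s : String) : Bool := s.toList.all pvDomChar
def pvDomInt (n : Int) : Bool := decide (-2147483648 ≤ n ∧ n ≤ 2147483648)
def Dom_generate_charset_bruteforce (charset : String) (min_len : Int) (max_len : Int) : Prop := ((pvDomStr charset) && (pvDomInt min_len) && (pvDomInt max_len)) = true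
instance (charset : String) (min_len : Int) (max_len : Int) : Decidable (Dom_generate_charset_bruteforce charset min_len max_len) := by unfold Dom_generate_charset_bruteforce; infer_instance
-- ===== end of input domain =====

-- B replaces the per-length itertools.product calls with incremental extension of the
-- previous length's (capped) list and slice-based emission; return values only are compared.

-- ===== PORT A =====
-- itertools.product(charset, repeat=n) as a list, in product's lexicographic order
def prodA (cs : List Char) : Nat → List (List Char)
  | 0 => [[]]
  | n + 1 => (prodA cs n).flatMap (fun p => cs.map (fun c => p ++ [c]))

-- inner 'for combo in product(...)' loop with the early return at 100_000 (Bool = returned early)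
def innerA : List (List Char) → List String → List String × Bool
  | [], acc => (acc, false)
  | combo :: rest, acc =>
    let acc' := acc ++ [String.mk combo]
    if 100000 ≤ acc'.length then (acc', true) else innerA rest acc'

-- outer 'for length in range(min_len, max_len + 1)' loop
def outerA (cs : List Char) : List Int → List String → List String
  | [], acc => acc
  | l :: rest, acc =>
    let r := innerA (prodA cs l.toNat) acc
    if r.2 then r.1 else outerA cs rest r.1

def generate_charset_bruteforce (charset : String) (min_len : Int) (max_len : Int) : List String :=
  outerA charset.toList (PySem.List.pyRange min_len (max_len + 1) 1) []

-- ===== PORT B =====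
-- 'nxt' loop: extend each s of current by every charset char, breaking once 100_000 reached
def growB (cs : List Char) : List (List Char) → List (List Char) → List (List Char)
  | [], nxt => nxt
  | s :: rest, nxt =>
    if 100000 ≤ nxt.length then nxt
    else growB cs rest (nxt ++ cs.map (fun c => s ++ [c]))

-- 'for length in range(0, max_len + 1)' loop carrying (current, results);
-- early return 'results + current[:need]' is the first branch
def goB (cs : List Char) (min_len max_len : Int) : List Int → List (List Char) → List String → List String
  | [], _, results => results
  | l :: rest, current, results =>
    if min_len ≤ l ∧ 100000 - results.length ≤ current.length then
      results ++ (current.take (100000 - results.length)).map String.mk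
    else
      let results' := if min_len ≤ l then results ++ current.map String.mk else results
      let current' := if l < max_len then (growB cs current []).take 100000 else current
      goB cs min_len max_len rest current' results'

def generate_charset_bruteforce_alt (charset : String) (min_len : Int) (max_len : Int) : List String :=
  if max_len < min_len then []
  else goB charset.toList min_len max_len (PySem.List.pyRange 0 (max_len + 1) 1) [[]] []

-- ===== PRECONDITION & SPEC =====
-- Pre_ excludes exactly the inputs where A raises: itertools.product(charset, repeat=length)
-- raises ValueError for a negative length, reached iff min_len < 0 and min_len ≤ max_len.
def Pre_generate_charset_bruteforce (charset : String) (min_len : Int) (max_len : Int) : Prop :=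
  0 ≤ min_len ∨ max_len < min_len
instance (charset : String) (min_len : Int) (max_len : Int) : Decidable (Pre_generate_charset_bruteforce charset min_len max_len) := by unfold Pre_generate_charset_bruteforce; infer_instance

def pvWitness_generate_charset_bruteforce : String × Int × Int := ("ab", 1, 2)

def Spec_generate_charset_bruteforce (charset : String) (min_len : Int) (max_len : Int) (out : List String) : Prop := out = generate_charset_bruteforce_alt charset min_len max_len
instance (charset : String) (min_len : Int) (max_len : Int) (out : List String) : Decidable (Spec_generate_charset_bruteforce charset min_len max_len out) := by unfold Spec_generate_charset_bruteforce; infer_instance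

-- ===== CLAIM (what is proved, stated in full; the proofs are below) =====
def Claim_equal_generate_charset_bruteforce : Prop := ∀ (charset : String) (min_len : Int) (max_len : Int), Dom_generate_charset_bruteforce charset min_len max_len → Pre_generate_charset_bruteforce charset min_len max_len → Spec_generate_charset_bruteforce charset min_len max_len (generate_charset_bruteforce charset min_len max_len)

-- ===== LEMMAS AND PROOFS =====

-- one extension step: all strings of length n+1 from those of length n
def extB (cs : List Char) (l : List (List Char)) : List (List Char) :=
  l.flatMap (fun s => cs.map (fun c => s ++ [c]))

-- per-length contribution to the (uncapped) ideal output, with the min_len filter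
def contrib (cs : List Char) (min_len : Int) (l : Int) : List String :=
  if min_len ≤ l then (prodA cs l.toNat).map String.mk else []

lemma innerA_spec (combos : List (List Char)) (acc : List String) (h : acc.length < 100000) :
    innerA combos acc =
      ((acc ++ combos.map String.mk).take 100000,
        decide (100000 ≤ acc.length + combos.length)) := by
  induction combos generalizing acc with
  | nil =>
    simp [innerA, List.take_of_length_le (Nat.le_of_lt h), Nat.not_le_of_lt h]
  | cons c rest ih =>
    simp only [innerA, List.map_cons]
    by_cases hc : 100000 ≤ (acc ++ [String.mk c]).length
    · rw [if_pos hc, Prod.mk.injEq]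
      have hlen : (acc ++ [String.mk c]).length = 100000 := by
        simp at hc ⊢; omega
      refine ⟨?_, ?_⟩
      · rw [show acc ++ String.mk c :: rest.map String.mk
              = (acc ++ [String.mk c]) ++ rest.map String.mk by simp,
          List.take_append_of_le_length (by omega),
          List.take_of_length_le (by omega)]
      · simp at hlen ⊢; omega
    · rw [if_neg hc]
      rw [ih _ (by simp at hc ⊢; omega), Prod.mk.injEq]
      refine ⟨by simp, ?_⟩
      simp at hc ⊢
      omega

lemma outerA_spec (cs : List Char) (lengths : List Int) (acc : List String)
    (h : acc.length < 100000) :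
    outerA cs lengths acc =
      (acc ++ lengths.flatMap (fun l => (prodA cs l.toNat).map String.mk)).take 100000 := by
  induction lengths generalizing acc with
  | nil => simp [outerA, List.take_of_length_le (Nat.le_of_lt h)]
  | cons l rest ih =>
    rw [outerA, innerA_spec _ _ h]
    by_cases hc : 100000 ≤ acc.length + (prodA cs l.toNat).length
    · simp only [decide_eq_true hc, if_true]
      conv_rhs => rw [List.flatMap_cons, ← List.append_assoc,
        List.take_append_of_le_length (show (100000:Nat) ≤ (acc ++ (prodA cs l.toNat).map String.mk).length by simp; omega)]
    · simp only [decide_eq_false hc, Bool.false_eq_true, if_false]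
      have hlt : (acc ++ (prodA cs l.toNat).map String.mk).length < 100000 := by
        simp; omega
      rw [List.take_of_length_le (Nat.le_of_lt hlt), ih _ hlt]
      simp [List.flatMap_cons]

lemma growB_take (cs : List Char) (current nxt : List (List Char)) :
    (growB cs current nxt).take 100000 = (nxt ++ extB cs current).take 100000 := by
  induction current generalizing nxt with
  | nil => simp [growB, extB]
  | cons s rest ih =>
    rw [growB]
    by_cases hc : 100000 ≤ nxt.length
    · rw [if_pos hc, List.take_append_of_le_length hc]
    · rw [if_neg hc, ih]
      simp [extB]

lemma length_le_length_flatMap {α β : Type} (f : α → List β) (h : ∀ a, 1 ≤ (f a).length)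
    (l : List α) : l.length ≤ (l.flatMap f).length := by
  induction l with
  | nil => simp
  | cons a rest ih =>
    have := h a
    simp only [List.flatMap_cons, List.length_append, List.length_cons]
    omega

lemma take_flatMap_take {α β : Type} (f : α → List β) (h : ∀ a, 1 ≤ (f a).length)
    (l : List α) (n : Nat) :
    ((l.take n).flatMap f).take n = (l.flatMap f).take n := by
  by_cases hl : l.length ≤ n
  · rw [List.take_of_length_le hl]
  · conv_rhs => rw [← List.take_append_drop n l]
    rw [List.flatMap_append, List.take_append_of_le_length]
    have h1 : (l.take n).length = n := by
      rw [List.length_take]; omega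
    calc n = (l.take n).length := h1.symm
    _ ≤ _ := length_le_length_flatMap f h _

lemma take_extB_take (cs : List Char) (l : List (List Char)) :
    (extB cs (l.take 100000)).take 100000 = (extB cs l).take 100000 := by
  rcases cs with _ | ⟨c, cs'⟩
  · have h0 : ∀ (m : List (List Char)), m.flatMap (fun _ => ([] : List (List Char))) = [] := by
      intro m; simp
    simp only [extB, List.map_nil, h0]

  · exact take_flatMap_take _ (fun a => by simp) l 100000

lemma goB_spec (cs : List Char) (min_len max_len : Int) :
    ∀ (k : Nat) (l : Int) (results : List String), 0 ≤ l →
      (max_len + 1 - l).toNat = k → results.length < 100000 →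
      goB cs min_len max_len (PySem.List.pyRange l (max_len + 1) 1)
          ((prodA cs l.toNat).take 100000) results
        = (results ++ (PySem.List.pyRange l (max_len + 1) 1).flatMap (contrib cs min_len)).take 100000 := by
  intro k
  induction k with
  | zero =>
    intro l results hl hk hr
    rw [PySem.List.pyRange_one_eq_nil (by omega)]
    simp [goB, List.take_of_length_le (Nat.le_of_lt hr)]
  | succ k ih =>
    intro l results hl hk hr
    have hlt : l < max_len + 1 := by omega
    rw [PySem.List.pyRange_one_cons hlt]
    rw [goB]
    set P := prodA cs l.toNat with hP
    by_cases hc : min_len ≤ l ∧ 100000 - results.length ≤ (P.take 100000).length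
    · rw [if_pos hc]
      obtain ⟨hml, hneed⟩ := hc
      have hPlen : 100000 - results.length ≤ P.length := by
        rw [List.length_take] at hneed; omega
      have hcl : contrib cs min_len l = P.map String.mk := by
        simp only [contrib, if_pos hml]; rw [hP]
      have h1 : (100000:Nat) ≤ (results ++ P.map String.mk).length := by simp; omega
      conv_rhs => rw [List.flatMap_cons, hcl, ← List.append_assoc,
        List.take_append_of_le_length h1, List.take_append,
        List.take_of_length_le (Nat.le_of_lt hr)]
      congr 1
      rw [List.map_take, List.map_take, List.take_take]
      congr 1
      omega
    · rw [if_neg hc]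
      have hsmall : ¬ (min_len ≤ l) ∨ (P.take 100000).length < 100000 - results.length := by
        by_cases h1 : min_len ≤ l
        · right; omega
        · left; exact h1
      -- the emitted-results invariant and the equality C = P when emitting
      have hCP : min_len ≤ l → (P.take 100000 = P ∧ results.length + P.length < 100000) := by
        intro hml
        have h2 : (P.take 100000).length < 100000 - results.length := by
          rcases hsmall with h | h
          · exact absurd hml h
          · exact h
        rw [List.length_take] at h2
        have : P.length < 100000 := by omega
        exact ⟨List.take_of_length_le (by omega), by omega⟩
      have hres' : (if min_len ≤ l then results ++ (P.take 100000).map String.mk else results)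
          = results ++ contrib cs min_len l := by
        by_cases hml : min_len ≤ l
        · rw [if_pos hml, (hCP hml).1]; simp only [contrib, if_pos hml]; rw [hP]
        · rw [if_neg hml]; simp [contrib, hml]
      have hreslen : (results ++ contrib cs min_len l).length < 100000 := by
        by_cases hml : min_len ≤ l
        · have := (hCP hml).2
          simp [contrib, hml]; omega
        · simp [contrib, hml]; omega
      rw [hres']
      by_cases hlm : l < max_len
      · rw [if_pos hlm]
        have hcur : (growB cs (P.take 100000) []).take 100000
            = (prodA cs (l + 1).toNat).take 100000 := by
          rw [growB_take, List.nil_append, take_extB_take]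
          have : (l + 1).toNat = l.toNat + 1 := by omega
          rw [this, prodA]
          rfl
        rw [hcur, ih (l + 1) _ (by omega) (by omega) hreslen]
        rw [List.flatMap_cons]
        simp
      · rw [if_neg hlm]
        have hle : l = max_len := by omega
        rw [show l + 1 = max_len + 1 by omega, PySem.List.pyRange_one_eq_nil (by omega)]
        rw [goB]
        simp only [List.flatMap_cons, List.flatMap_nil, List.append_nil]
        rw [List.take_of_length_le (Nat.le_of_lt hreslen)]

lemma flatMap_contrib_nil (cs : List Char) (min_len : Int) (lengths : List Int)
    (h : ∀ l ∈ lengths, l < min_len) :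
    lengths.flatMap (contrib cs min_len) = [] := by
  induction lengths with
  | nil => simp
  | cons a rest ih =>
    rw [List.flatMap_cons, ih (fun l hl => h l (List.mem_cons_of_mem a hl))]
    have := h a (List.mem_cons_self ..)
    have hna : ¬ min_len ≤ a := by omega
    simp [contrib, hna]

lemma flatMap_contrib_all (cs : List Char) (min_len : Int) (lengths : List Int)
    (h : ∀ l ∈ lengths, min_len ≤ l) :
    lengths.flatMap (contrib cs min_len)
      = lengths.flatMap (fun l => (prodA cs l.toNat).map String.mk) := by
  induction lengths with
  | nil => simp
  | cons a rest ih =>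
    rw [List.flatMap_cons, List.flatMap_cons, ih (fun l hl => h l (List.mem_cons_of_mem a hl))]
    have := h a (List.mem_cons_self ..)
    simp [contrib, this]

-- ===== VERDICT (by name: the statement is the Claim_ definition above) =====
theorem generate_charset_bruteforce_spec : Claim_equal_generate_charset_bruteforce := by
  intro charset min_len max_len _ hpre
  unfold Spec_generate_charset_bruteforce
  unfold generate_charset_bruteforce generate_charset_bruteforce_alt
  by_cases hmm : max_len < min_len
  · rw [if_pos hmm, PySem.List.pyRange_one_eq_nil (show max_len + 1 ≤ min_len by omega)]
    simp [outerA]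
  · rw [if_neg hmm]
    have h0m : 0 ≤ min_len := by
      rcases hpre with h | h
      · exact h
      · omega
    rw [outerA_spec _ _ _ (by simp)]
    have h0 : [[]] = (prodA charset.toList ((0 : Int).toNat)).take 100000 := by
      simp [prodA]
    rw [h0, goB_spec charset.toList min_len max_len ((max_len + 1 - 0).toNat) 0 [] le_rfl rfl (by simp)]
    simp only [List.nil_append]
    congr 1
    rw [PySem.List.pyRange_one_append 0 min_len (max_len + 1) h0m (by omega),
      List.flatMap_append,
      flatMap_contrib_nil _ _ _ (fun l hl => by
        have := (PySem.List.mem_pyRange_one).1 hl; omega),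
      flatMap_contrib_all _ _ _ (fun l hl => by
        have := (PySem.List.mem_pyRange_one).1 hl; omega)]
    simp
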